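-- pv_equiv track=rewrite | github.com/luisEduardoBet/T-TEA2.0 | udescjoinvilletteautil/qtdateformat.py | strftime_to_qt
-- ===== SOURCE A (Python) =====
-- from typing import Final
--
-- def strftime_to_qt(strftime_mask: str) -> str:
--     """
--     Convert a Python ``strftime`` format string to Qt format syntax.
--
--     Parameters
--     ----------
--     strftime_mask : str
--         Date format using ``strftime`` directives, e.g.
--         ``"%d/%m/%Y"``, ``"%Y-%m-%d"`` or ``"%d de %B de %Y"``.
--
--     Returns
--     -------
--     str
--         Equivalent format string understood by Qt.
--
--     Notes
--     -----
--     Supported ``strftime`` to Qt mappings: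
--
--     ===========  =======  ==================================
--     strftime     Qt       Description
--     ===========  =======  ==================================
--     %Y           yyyy     4-digit year
--     %y           yy       2-digit year
--     %m           MM       Month as zero-padded number (01-12)
--     %d           dd       Day as zero-padded number (01-31)
--     %B           MMMM     Full month name
--     %b           MMM      Abbreviated month name
--     %A           dddd     Full weekday name
--     %a           ddd      Abbreviated weekday name
--     ===========  =======  ==================================
--
--     All literal characters (slashes, dashes, spaces, words like "de",
--     commas, etc.) are preserved unchanged.
--
--     Examples
--     --------
--     >>> QtDateFormat.strftime_to_qt("%d/%m/%Y")
--     'dd/MM/yyyy'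
--
--     >>> QtDateFormat.strftime_to_qt("%Y-%m-%d")
--     'yyyy-MM-dd'
--
--     >>> QtDateFormat.strftime_to_qt("%d de %B de %Y")
--     'dd de MMMM de yyyy'
--
--     >>> QtDateFormat.strftime_to_qt("%a, %d %b %Y")
--     'ddd, dd MMM yyyy'
--     """
--     _replacements: Final[dict[str, str]] = {
--         "%Y": "yyyy",
--         "%y": "yy",
--         "%m": "MM",
--         "%d": "dd",
--         "%B": "MMMM",
--         "%b": "MMM",
--         "%A": "dddd",
--         "%a": "ddd",
--     }
--
--     qt_mask = strftime_mask
--     for py_token, qt_token in _replacements.items():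
--         qt_mask = qt_mask.replace(py_token, qt_token)
--
--     return qt_mask
-- ===== SOURCE B (Python) =====
-- _QT = {"Y": "yyyy", "y": "yy", "m": "MM", "d": "dd",
--        "B": "MMMM", "b": "MMM", "A": "dddd", "a": "ddd"}
--
-- def strftime_to_qt(strftime_mask: str) -> str:
--     """Single left-to-right scan: emit the Qt token for each known '%X'
--     directive, copy every other character unchanged."""
--     out = []
--     i = 0
--     n = len(strftime_mask)
--     while i < n:
--         c = strftime_mask[i]
--         if c == "%" and i + 1 < n and strftime_mask[i + 1] in _QT:
--             out.append(_QT[strftime_mask[i + 1]])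
--             i += 2
--         else:
--             out.append(c)
--             i += 1
--     return "".join(out)
-- ===== Notes on version B (the rewrite author's own statement) =====
-- stated objective: idiomatic
-- what changed: Replaces A's 8 sequential whole-string str.replace passes with a single left-to-right scan that emits the Qt token for each known '%X' directive and copies every other character.
-- intended difference: On inputs containing '%%Y', A's %Y-pass leaves '%yyyy' which its later %y-pass re-matches (A('%%Y') = 'yyyyy'); B returns '%yyyy', the intended result that converts each directive once and keeps the literal '%'. — e.g. on strftime_to_qt("%%Y"): A returns "yyyyy", B returns "%yyyy"
import Mathlib
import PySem

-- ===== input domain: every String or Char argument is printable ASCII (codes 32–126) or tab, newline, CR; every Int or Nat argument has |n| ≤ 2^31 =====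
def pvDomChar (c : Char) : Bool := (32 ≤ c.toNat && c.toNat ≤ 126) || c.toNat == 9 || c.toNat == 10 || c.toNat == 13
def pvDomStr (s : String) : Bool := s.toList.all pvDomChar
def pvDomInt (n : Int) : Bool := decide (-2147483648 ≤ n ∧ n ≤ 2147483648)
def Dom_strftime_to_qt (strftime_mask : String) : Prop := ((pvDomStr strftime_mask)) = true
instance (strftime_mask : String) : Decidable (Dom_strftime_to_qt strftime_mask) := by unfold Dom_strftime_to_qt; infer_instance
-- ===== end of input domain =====

-- B replaces A's 8 sequential str.replace passes with one left-to-right scan over the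
-- characters (idiomatic single traversal); on inputs containing "%%Y" (D_ below) A's later
-- %y-pass re-matches the output of its %Y-pass and B returns the intended value instead.


-- ===== PORT A =====
-- A builds the replacement dict in insertion order and applies str.replace once per entry.
def strftime_to_qt (strftime_mask : String) : String :=
  ([("%Y", "yyyy"), ("%y", "yy"), ("%m", "MM"), ("%d", "dd"),
    ("%B", "MMMM"), ("%b", "MMM"), ("%A", "dddd"), ("%a", "ddd")] :
      List (String × String)).foldl
    (fun qt_mask pr => PySem.Str.replace qt_mask pr.1 pr.2) strftime_mask

-- ===== PORT B =====
-- B: dict lookup for a directive letter (None = not a known directive).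
def qtToken? (c : Char) : Option (List Char) :=
  if c = 'Y' then some ['y', 'y', 'y', 'y']
  else if c = 'y' then some ['y', 'y']
  else if c = 'm' then some ['M', 'M']
  else if c = 'd' then some ['d', 'd']
  else if c = 'B' then some ['M', 'M', 'M', 'M']
  else if c = 'b' then some ['M', 'M', 'M']
  else if c = 'A' then some ['d', 'd', 'd', 'd']
  else if c = 'a' then some ['d', 'd', 'd']
  else none

-- B's while loop: at '%' with a known directive letter next, emit the token and advance 2,
-- otherwise emit the current character and advance 1.
def scanQt : List Char → List Char
  | [] => []
  | [c] => [c]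
  | c :: d :: t =>
    if c = '%' then
      match qtToken? d with
      | some q => q ++ scanQt t
      | none => c :: scanQt (d :: t)
    else c :: scanQt (d :: t)

def strftime_to_qt_alt (strftime_mask : String) : String :=
  String.ofList (scanQt strftime_mask.toList)

-- ===== PRECONDITION & SPEC =====
-- On inputs containing "%%Y", A's %Y-pass leaves "%yyyy" which its later %y-pass re-matches
-- (A "%%Y" = "yyyyy"); B returns "%yyyy", the intended result that converts each directive
-- once and preserves the literal '%'.
def D_strftime_to_qt (strftime_mask : String) : Prop :=
  PySem.Str.isIn "%%Y" strftime_mask = true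
instance (strftime_mask : String) : Decidable (D_strftime_to_qt strftime_mask) := by
  unfold D_strftime_to_qt; infer_instance

def Spec_strftime_to_qt (strftime_mask : String) (out : String) : Prop :=
  ¬ D_strftime_to_qt strftime_mask → out = strftime_to_qt_alt strftime_mask
instance (strftime_mask : String) (out : String) : Decidable (Spec_strftime_to_qt strftime_mask out) := by
  unfold Spec_strftime_to_qt; infer_instance

def pvDiffWitness_strftime_to_qt : String := "%%Y"
def pvDiffWitnessOut_strftime_to_qt : String × String := ("yyyyy", "%yyyy")

-- ===== CLAIM (what is proved, stated in full; the proofs are below) =====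
def Claim_unchanged_strftime_to_qt : Prop := ∀ (strftime_mask : String), Dom_strftime_to_qt strftime_mask → Spec_strftime_to_qt strftime_mask (strftime_to_qt strftime_mask)
def Claim_exact_strftime_to_qt : Prop := ∀ (strftime_mask : String), Dom_strftime_to_qt strftime_mask → D_strftime_to_qt strftime_mask → strftime_to_qt strftime_mask ≠ strftime_to_qt_alt strftime_mask
def Claim_changed_strftime_to_qt : Prop := Dom_strftime_to_qt (pvDiffWitness_strftime_to_qt) ∧ D_strftime_to_qt (pvDiffWitness_strftime_to_qt) ∧ strftime_to_qt (pvDiffWitness_strftime_to_qt) = pvDiffWitnessOut_strftime_to_qt.1 ∧ strftime_to_qt_alt (pvDiffWitness_strftime_to_qt) = pvDiffWitnessOut_strftime_to_qt.2 ∧ pvDiffWitnessOut_strftime_to_qt.1 ≠ pvDiffWitnessOut_strftime_to_qt.2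

-- ===== LEMMAS AND PROOFS =====

-- Characterization of Python's str.replace for a 2-character pattern '%e' (non-overlapping,
-- left to right): exactly PySem.Chars.replace.go's behaviour, without fuel or accumulator.
def rep2 (e : Char) (q : List Char) : List Char → List Char
  | [] => []
  | [c] => [c]
  | c :: d :: t => if c = '%' ∧ d = e then q ++ rep2 e q t else c :: rep2 e q (d :: t)

lemma goEq (e : Char) (q : List Char) :
    ∀ (fuel : Nat) (l acc : List Char), l.length ≤ fuel →
      PySem.Chars.replace.go ['%', e] q fuel l acc = acc.reverse ++ rep2 e q l := by
  intro fuel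
  induction fuel with
  | zero =>
    intro l acc h
    have hl : l = [] := List.eq_nil_of_length_eq_zero (Nat.le_zero.mp h)
    subst hl
    rw [PySem.Chars.replace.go.eq_def]
    simp [rep2]
  | succ n ih =>
    intro l acc h
    rw [PySem.Chars.replace.go.eq_def]
    rcases l with _ | ⟨c, _ | ⟨d, t⟩⟩
    · simp [rep2]
    · have hp : (['%', e].isPrefixOf [c]) = false := by
        simp [List.isPrefixOf]
      simp only [hp, Bool.false_eq_true, if_false]
      rw [ih [] (c :: acc) (by simp)]
      simp [rep2]
    · by_cases hm : c = '%' ∧ d = e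
      · obtain ⟨rfl, rfl⟩ := hm
        have hp : (['%', d].isPrefixOf ('%' :: d :: t)) = true := by
          simp [List.isPrefixOf]
        simp only [hp, if_true]
        have hdrop : List.drop (['%', d].length) ('%' :: d :: t) = t := rfl
        rw [hdrop, ih t (q.reverse ++ acc) (by simp at h ⊢; omega)]
        simp [rep2]
      · have hp : (['%', e].isPrefixOf (c :: d :: t)) = false := by
          simp only [List.isPrefixOf, Bool.and_eq_false_iff]
          by_cases hc : c = '%'
          · subst hc
            have hd : d ≠ e := fun hd => hm ⟨rfl, hd⟩
            simp only [beq_eq_false_iff_ne, ne_eq]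
            right; left; exact Ne.symm hd
          · simp only [beq_eq_false_iff_ne, ne_eq]
            left; exact Ne.symm hc
        simp only [hp, Bool.false_eq_true, if_false]
        rw [ih (d :: t) (c :: acc) (by simp at h ⊢; omega)]
        simp [rep2, hm]

lemma chars_rep (e : Char) (q l : List Char) :
    PySem.Chars.replace l ['%', e] q = rep2 e q l := by
  rw [PySem.Chars.replace]
  simp only [List.isEmpty_cons, Bool.false_eq_true, if_false]
  rw [goEq e q l.length l [] le_rfl]
  simp

-- basic rep2 facts
lemma L0 {e : Char} {q : List Char} {c : Char} (hc : c ≠ '%') (s : List Char) :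
    rep2 e q (c :: s) = c :: rep2 e q s := by
  cases s <;> simp [rep2, hc]

lemma Lpct {e : Char} {q : List Char} (_he : e ≠ '%') {l : List Char}
    (hl : l.head? ≠ some e) : rep2 e q ('%' :: l) = '%' :: rep2 e q l := by
  cases l with
  | nil => simp [rep2]
  | cons d u =>
    have hd : d ≠ e := by simpa using hl
    simp [rep2, hd]

lemma Lmatch (e : Char) (q : List Char) (s : List Char) :
    rep2 e q ('%' :: e :: s) = q ++ rep2 e q s := by
  simp [rep2]

lemma R4 {e : Char} {q : List Char} {u : List Char} (hu : ∀ a ∈ u, a ≠ '%')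
    (X : List Char) : rep2 e q (u ++ X) = u ++ rep2 e q X := by
  induction u with
  | nil => rfl
  | cons a u ih =>
    rw [List.cons_append, L0 (hu a (by simp)), ih (fun b hb => hu b (by simp [hb]))]
    rfl

lemma Lrepl_all {e : Char} {q : List Char} (he : e ≠ '%') :
    ∀ j, rep2 e q (List.replicate j '%') = List.replicate j '%' := by
  intro j
  induction j with
  | zero => rfl
  | succ j ih =>
    rw [List.replicate_succ, Lpct he ?hh, ih]
    case hh =>
      cases j with
      | zero => simp
      | succ k => simp [List.replicate_succ, Ne.symm he]

lemma Lj {e : Char} {q : List Char} (he : e ≠ '%') {c : Char} (hc : c ≠ '%')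
    (hce : c ≠ e) : ∀ (m : Nat) (X : List Char),
    rep2 e q (List.replicate m '%' ++ c :: X) = List.replicate m '%' ++ c :: rep2 e q X := by
  intro m
  induction m with
  | zero => intro X; simpa using L0 hc X
  | succ m ih =>
    intro X
    rw [List.replicate_succ, List.cons_append, Lpct he ?hh, ih, List.cons_append]
    case hh =>
      cases m with
      | zero => simpa using hce
      | succ k => simp [List.replicate_succ, Ne.symm he]

lemma Lmj {e : Char} {q : List Char} (he : e ≠ '%') :
    ∀ (m : Nat) (X : List Char),
    rep2 e q (List.replicate m '%' ++ '%' :: e :: X)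
      = List.replicate m '%' ++ (q ++ rep2 e q X) := by
  intro m
  induction m with
  | zero => intro X; simpa using Lmatch e q X
  | succ m ih =>
    intro X
    rw [List.replicate_succ, List.cons_append, Lpct he ?hh, ih, List.cons_append]
    case hh =>
      cases m with
      | zero => simpa using Ne.symm he
      | succ k => simp [List.replicate_succ, Ne.symm he]

-- the chain of all replace passes, as a fold over (pattern letter, token) pairs
def rchain (L : List (Char × List Char)) (l : List Char) : List Char :=
  L.foldl (fun t p => rep2 p.1 p.2 t) l

def RL : List (Char × List Char) :=
  [('Y', ['y', 'y', 'y', 'y']), ('y', ['y', 'y']), ('m', ['M', 'M']), ('d', ['d', 'd']),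
   ('B', ['M', 'M', 'M', 'M']), ('b', ['M', 'M', 'M']), ('A', ['d', 'd', 'd', 'd']),
   ('a', ['d', 'd', 'd'])]

lemma rchain_cons (e : Char) (q : List Char) (L : List (Char × List Char)) (l : List Char) :
    rchain ((e, q) :: L) l = rchain L (rep2 e q l) := rfl

lemma G0 {c : Char} (hc : c ≠ '%') : ∀ (L : List (Char × List Char)) (X : List Char),
    rchain L (c :: X) = c :: rchain L X := by
  intro L
  induction L with
  | nil => intro X; rfl
  | cons p L ih =>
    intro X
    rw [rchain_cons p.1 p.2, L0 hc, ih, rchain_cons]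

lemma Gall {L : List (Char × List Char)} (hL : ∀ p ∈ L, p.1 ≠ '%') (j : Nat) :
    rchain L (List.replicate j '%') = List.replicate j '%' := by
  induction L with
  | nil => rfl
  | cons p L ih =>
    rw [rchain_cons p.1 p.2, Lrepl_all (hL p (by simp)) j,
      ih (fun r hr => hL r (by simp [hr]))]

lemma Gskip {L : List (Char × List Char)} {c : Char}
    (hL : ∀ p ∈ L, p.1 ≠ '%' ∧ p.1 ≠ c) (hc : c ≠ '%') :
    ∀ (m : Nat) (X : List Char),
    rchain L (List.replicate m '%' ++ c :: X)
      = List.replicate m '%' ++ c :: rchain L X := by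
  induction L with
  | nil => intro m X; rfl
  | cons p L ih =>
    intro m X
    obtain ⟨h1, h2⟩ := hL p (by simp)
    rw [rchain_cons p.1 p.2, Lj h1 hc (fun h => h2 h.symm), ih (fun r hr => hL r (by simp [hr])),
      rchain_cons]

lemma Gtok0 {L : List (Char × List Char)} (hL : ∀ p ∈ L, p.1 ≠ '%')
    {q' : List Char} (hq : ∀ a ∈ q', a ≠ '%') :
    ∀ (X : List Char), rchain L (q' ++ X) = q' ++ rchain L X := by
  induction L with
  | nil => intro X; rfl
  | cons p L ih =>
    intro X
    rw [rchain_cons p.1 p.2, R4 hq, ih (fun r hr => hL r (by simp [hr])), rchain_cons]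

lemma Gtok {L : List (Char × List Char)} {c₀ : Char} {qr : List Char}
    (hL : ∀ p ∈ L, p.1 ≠ '%' ∧ p.1 ≠ c₀) (hc₀ : c₀ ≠ '%')
    (hqr : ∀ a ∈ qr, a ≠ '%') :
    ∀ (m : Nat) (X : List Char),
    rchain L (List.replicate m '%' ++ (c₀ :: qr) ++ X)
      = List.replicate m '%' ++ (c₀ :: qr) ++ rchain L X := by
  induction L with
  | nil => intro m X; rfl
  | cons p L ih =>
    intro m X
    obtain ⟨h1, h2⟩ := hL p (by simp)
    rw [rchain_cons p.1 p.2]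
    have step : rep2 p.1 p.2 (List.replicate m '%' ++ (c₀ :: qr) ++ X)
        = List.replicate m '%' ++ (c₀ :: qr) ++ rep2 p.1 p.2 X := by
      rw [List.append_assoc, List.cons_append,
        Lj h1 hc₀ (fun h => h2 h.symm), R4 hqr, List.append_assoc, List.cons_append]
    rw [step, ih (fun r hr => hL r (by simp [hr])), rchain_cons]

lemma replicate_shift (m : Nat) (c : Char) (X : List Char) :
    List.replicate (m + 1) '%' ++ c :: X = List.replicate m '%' ++ '%' :: c :: X := by
  simp [List.replicate_succ', List.append_assoc]

lemma Gmatch (L pre post : List (Char × List Char)) (c c₀ : Char) (q qr : List Char)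
    (hLdef : L = pre ++ (c, q) :: post) (hqdef : q = c₀ :: qr)
    (hpre : ∀ p ∈ pre, p.1 ≠ '%' ∧ p.1 ≠ c) (hc : c ≠ '%')
    (hc₀ : c₀ ≠ '%') (hqr : ∀ a ∈ qr, a ≠ '%')
    (hpost : ∀ p ∈ post, p.1 ≠ '%' ∧ p.1 ≠ c₀) :
    ∀ (m : Nat) (X : List Char),
    rchain L (List.replicate m '%' ++ '%' :: c :: X)
      = List.replicate m '%' ++ (q ++ rchain L X) := by
  subst hLdef
  intro m X
  have hsplit : ∀ Y : List Char,
      rchain (pre ++ (c, q) :: post) Y = rchain post (rep2 c q (rchain pre Y)) := by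
    intro Y; simp [rchain, List.foldl_append]
  rw [hsplit, hsplit]
  rw [← replicate_shift, Gskip hpre hc, replicate_shift, Lmj hc, hqdef]
  have : rchain post (List.replicate m '%' ++ (c₀ :: qr ++ rep2 c (c₀ :: qr) (rchain pre X)))
      = List.replicate m '%' ++ (c₀ :: qr ++ rchain post (rep2 c (c₀ :: qr) (rchain pre X))) := by
    have := Gtok hpost hc₀ hqr m (rep2 c (c₀ :: qr) (rchain pre X))
    simpa [List.append_assoc] using this
  rw [this]

lemma Gmatch0 (L pre post : List (Char × List Char)) (c : Char) (q : List Char)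
    (hLdef : L = pre ++ (c, q) :: post)
    (hpre : ∀ p ∈ pre, p.1 ≠ '%' ∧ p.1 ≠ c) (hc : c ≠ '%')
    (hq : ∀ a ∈ q, a ≠ '%') (hpost : ∀ p ∈ post, p.1 ≠ '%') :
    ∀ (X : List Char), rchain L ('%' :: c :: X) = q ++ rchain L X := by
  subst hLdef
  intro X
  have hsplit : ∀ Y : List Char,
      rchain (pre ++ (c, q) :: post) Y = rchain post (rep2 c q (rchain pre Y)) := by
    intro Y; simp [rchain, List.foldl_append]
  rw [hsplit, hsplit]
  have h1 : rchain pre ('%' :: c :: X) = '%' :: c :: rchain pre X := by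
    have := Gskip hpre hc 1 X
    simpa using this
  rw [h1, Lmatch, Gtok0 hpost hq]

-- specialised match lemmas, one per directive letter
lemma CH_Y : ∀ X, rchain RL ('%' :: 'Y' :: X) = ['y', 'y', 'y', 'y'] ++ rchain RL X :=
  Gmatch0 RL []
    [('y', ['y', 'y']), ('m', ['M', 'M']), ('d', ['d', 'd']), ('B', ['M', 'M', 'M', 'M']),
     ('b', ['M', 'M', 'M']), ('A', ['d', 'd', 'd', 'd']), ('a', ['d', 'd', 'd'])]
    'Y' ['y', 'y', 'y', 'y'] rfl (by simp) (by simp) (by simp) (by simp)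

lemma CH_y : ∀ m X, rchain RL (List.replicate m '%' ++ '%' :: 'y' :: X)
    = List.replicate m '%' ++ (['y', 'y'] ++ rchain RL X) :=
  Gmatch RL [('Y', ['y', 'y', 'y', 'y'])]
    [('m', ['M', 'M']), ('d', ['d', 'd']), ('B', ['M', 'M', 'M', 'M']),
     ('b', ['M', 'M', 'M']), ('A', ['d', 'd', 'd', 'd']), ('a', ['d', 'd', 'd'])]
    'y' 'y' ['y', 'y'] ['y'] rfl rfl (by simp) (by simp) (by simp) (by simp) (by simp)

lemma CH_m : ∀ m X, rchain RL (List.replicate m '%' ++ '%' :: 'm' :: X)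
    = List.replicate m '%' ++ (['M', 'M'] ++ rchain RL X) :=
  Gmatch RL [('Y', ['y', 'y', 'y', 'y']), ('y', ['y', 'y'])]
    [('d', ['d', 'd']), ('B', ['M', 'M', 'M', 'M']),
     ('b', ['M', 'M', 'M']), ('A', ['d', 'd', 'd', 'd']), ('a', ['d', 'd', 'd'])]
    'm' 'M' ['M', 'M'] ['M'] rfl rfl (by simp) (by simp) (by simp) (by simp) (by simp)

lemma CH_d : ∀ m X, rchain RL (List.replicate m '%' ++ '%' :: 'd' :: X)
    = List.replicate m '%' ++ (['d', 'd'] ++ rchain RL X) :=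
  Gmatch RL [('Y', ['y', 'y', 'y', 'y']), ('y', ['y', 'y']), ('m', ['M', 'M'])]
    [('B', ['M', 'M', 'M', 'M']),
     ('b', ['M', 'M', 'M']), ('A', ['d', 'd', 'd', 'd']), ('a', ['d', 'd', 'd'])]
    'd' 'd' ['d', 'd'] ['d'] rfl rfl (by simp) (by simp) (by simp) (by simp) (by simp)

lemma CH_B : ∀ m X, rchain RL (List.replicate m '%' ++ '%' :: 'B' :: X)
    = List.replicate m '%' ++ (['M', 'M', 'M', 'M'] ++ rchain RL X) :=
  Gmatch RL [('Y', ['y', 'y', 'y', 'y']), ('y', ['y', 'y']), ('m', ['M', 'M']), ('d', ['d', 'd'])]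
    [('b', ['M', 'M', 'M']), ('A', ['d', 'd', 'd', 'd']), ('a', ['d', 'd', 'd'])]
    'B' 'M' ['M', 'M', 'M', 'M'] ['M', 'M', 'M'] rfl rfl (by simp) (by simp) (by simp)
    (by simp) (by simp)

lemma CH_b : ∀ m X, rchain RL (List.replicate m '%' ++ '%' :: 'b' :: X)
    = List.replicate m '%' ++ (['M', 'M', 'M'] ++ rchain RL X) :=
  Gmatch RL [('Y', ['y', 'y', 'y', 'y']), ('y', ['y', 'y']), ('m', ['M', 'M']), ('d', ['d', 'd']),
    ('B', ['M', 'M', 'M', 'M'])]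
    [('A', ['d', 'd', 'd', 'd']), ('a', ['d', 'd', 'd'])]
    'b' 'M' ['M', 'M', 'M'] ['M', 'M'] rfl rfl (by simp) (by simp) (by simp)
    (by simp) (by simp)

lemma CH_A : ∀ m X, rchain RL (List.replicate m '%' ++ '%' :: 'A' :: X)
    = List.replicate m '%' ++ (['d', 'd', 'd', 'd'] ++ rchain RL X) :=
  Gmatch RL [('Y', ['y', 'y', 'y', 'y']), ('y', ['y', 'y']), ('m', ['M', 'M']), ('d', ['d', 'd']),
    ('B', ['M', 'M', 'M', 'M']), ('b', ['M', 'M', 'M'])]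
    [('a', ['d', 'd', 'd'])]
    'A' 'd' ['d', 'd', 'd', 'd'] ['d', 'd', 'd'] rfl rfl (by simp) (by simp) (by simp)
    (by simp) (by simp)

lemma CH_a : ∀ m X, rchain RL (List.replicate m '%' ++ '%' :: 'a' :: X)
    = List.replicate m '%' ++ (['d', 'd', 'd'] ++ rchain RL X) :=
  Gmatch RL [('Y', ['y', 'y', 'y', 'y']), ('y', ['y', 'y']), ('m', ['M', 'M']), ('d', ['d', 'd']),
    ('B', ['M', 'M', 'M', 'M']), ('b', ['M', 'M', 'M']), ('A', ['d', 'd', 'd', 'd'])]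
    []
    'a' 'd' ['d', 'd', 'd'] ['d', 'd'] rfl rfl (by simp) (by simp) (by simp)
    (by simp) (by simp)

-- scanQt facts
lemma scan_ne {c : Char} (hc : c ≠ '%') (s : List Char) :
    scanQt (c :: s) = c :: scanQt s := by
  cases s <;> simp [scanQt, hc]

lemma scan_tok {d : Char} {q : List Char} (htok : qtToken? d = some q) (t : List Char) :
    scanQt ('%' :: d :: t) = q ++ scanQt t := by
  simp [scanQt, htok]

lemma scan_none {d : Char} (htok : qtToken? d = none) (t : List Char) :
    scanQt ('%' :: d :: t) = '%' :: scanQt (d :: t) := by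
  simp [scanQt, htok]

lemma scan_pct_head {Z : List Char} (hz : Z.head? = some '%') :
    scanQt ('%' :: Z) = '%' :: scanQt Z := by
  cases Z with
  | nil => simp at hz
  | cons z zs =>
    have : z = '%' := by simpa using hz
    subst this
    exact scan_none (by decide) zs

lemma scan_pct_repl : ∀ (m : Nat) (x : List Char),
    scanQt (List.replicate m '%' ++ '%' :: x) = List.replicate m '%' ++ scanQt ('%' :: x) := by
  intro m
  induction m with
  | zero => intro x; rfl
  | succ m ih =>
    intro x
    rw [List.replicate_succ, List.cons_append, scan_pct_head ?hh, ih, List.cons_append]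
    case hh =>
      cases m with
      | zero => rfl
      | succ k => simp [List.replicate_succ]

lemma scan_all_pct : ∀ (m : Nat), scanQt (List.replicate m '%') = List.replicate m '%' := by
  intro m
  induction m with
  | zero => rfl
  | succ m ih =>
    rw [List.replicate_succ]
    cases m with
    | zero => rfl
    | succ k =>
      rw [scan_pct_head (by simp [List.replicate_succ]), ih]

-- directive-letter case analysis
lemma tokNone_all {c : Char} (h : qtToken? c = none) : ∀ p ∈ RL, p.1 ≠ '%' ∧ p.1 ≠ c := by
  have hc : c ≠ 'Y' ∧ c ≠ 'y' ∧ c ≠ 'm' ∧ c ≠ 'd' ∧ c ≠ 'B' ∧ c ≠ 'b' ∧ c ≠ 'A' ∧ c ≠ 'a' := by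
    refine ⟨?_, ?_, ?_, ?_, ?_, ?_, ?_, ?_⟩ <;> (rintro rfl; simp [qtToken?] at h)
  obtain ⟨h1, h2, h3, h4, h5, h6, h7, h8⟩ := hc
  intro p hp
  simp only [RL, List.mem_cons, List.not_mem_nil, or_false] at hp
  rcases hp with rfl | rfl | rfl | rfl | rfl | rfl | rfl | rfl
  · exact ⟨by decide, Ne.symm h1⟩
  · exact ⟨by decide, Ne.symm h2⟩
  · exact ⟨by decide, Ne.symm h3⟩
  · exact ⟨by decide, Ne.symm h4⟩
  · exact ⟨by decide, Ne.symm h5⟩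
  · exact ⟨by decide, Ne.symm h6⟩
  · exact ⟨by decide, Ne.symm h7⟩
  · exact ⟨by decide, Ne.symm h8⟩

lemma tokSome_cases {c : Char} {q : List Char} (h : qtToken? c = some q) :
    (c = 'Y' ∧ q = ['y', 'y', 'y', 'y']) ∨ (c = 'y' ∧ q = ['y', 'y']) ∨
    (c = 'm' ∧ q = ['M', 'M']) ∨ (c = 'd' ∧ q = ['d', 'd']) ∨
    (c = 'B' ∧ q = ['M', 'M', 'M', 'M']) ∨ (c = 'b' ∧ q = ['M', 'M', 'M']) ∨
    (c = 'A' ∧ q = ['d', 'd', 'd', 'd']) ∨ (c = 'a' ∧ q = ['d', 'd', 'd']) := by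
  simp only [qtToken?] at h
  split_ifs at h with h1 h2 h3 h4 h5 h6 h7 h8
  · exact Or.inl ⟨h1, by simpa using h.symm⟩
  · exact Or.inr (Or.inl ⟨h2, by simpa using h.symm⟩)
  · exact Or.inr (Or.inr (Or.inl ⟨h3, by simpa using h.symm⟩))
  · exact Or.inr (Or.inr (Or.inr (Or.inl ⟨h4, by simpa using h.symm⟩)))
  · exact Or.inr (Or.inr (Or.inr (Or.inr (Or.inl ⟨h5, by simpa using h.symm⟩))))
  · exact Or.inr (Or.inr (Or.inr (Or.inr (Or.inr (Or.inl ⟨h6, by simpa using h.symm⟩)))))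
  · exact Or.inr (Or.inr (Or.inr (Or.inr (Or.inr (Or.inr (Or.inl ⟨h7, by simpa using h.symm⟩))))))
  · exact Or.inr (Or.inr (Or.inr (Or.inr (Or.inr (Or.inr (Or.inr ⟨h8, by simpa using h.symm⟩))))))

-- leading-'%' decomposition
lemma lead_decomp : ∀ (s : List Char), ∃ j r, s = List.replicate j '%' ++ r ∧
    r.head? ≠ some '%' ∧ (s.head? = some '%' → 1 ≤ j) := by
  intro s
  induction s with
  | nil => exact ⟨0, [], rfl, by simp, by simp⟩
  | cons c t ih =>
    by_cases hc : c = '%'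
    · obtain ⟨j, r, h1, h2, _⟩ := ih
      subst hc
      exact ⟨j + 1, r, by simp [List.replicate_succ, h1], h2, fun _ => by omega⟩
    · exact ⟨0, c :: t, rfl, by simpa using hc, by simp [hc]⟩

-- main equivalence on char lists, outside the "%%Y" region
theorem chain_aux : ∀ (n : Nat) (s : List Char), s.length ≤ n →
    ¬ (['%', '%', 'Y'] <:+: s) → rchain RL s = scanQt s := by
  intro n
  induction n with
  | zero =>
    intro s hn _
    have : s = [] := List.eq_nil_of_length_eq_zero (Nat.le_zero.mp hn)
    subst this; rfl
  | succ n ih =>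
    intro s hn h
    rcases s with _ | ⟨c, w⟩
    · rfl
    · by_cases hc : c = '%'
      · subst hc
        obtain ⟨j, r, hs, hr, hj⟩ := lead_decomp ('%' :: w)
        have hj1 : 1 ≤ j := hj (by simp)
        obtain ⟨m, rfl⟩ : ∃ m, j = m + 1 := ⟨j - 1, by omega⟩
        rcases r with _ | ⟨c2, u⟩
        · rw [List.append_nil] at hs
          rw [hs, Gall (by simp [RL]) (m + 1), scan_all_pct]
        · have hc2 : c2 ≠ '%' := by simpa using hr
          have hs' : '%' :: w = List.replicate m '%' ++ '%' :: c2 :: u := by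
            rw [hs, replicate_shift]
          have hsuf : u <:+ ('%' :: w) :=
            ⟨List.replicate m '%' ++ ['%', c2], by simpa [List.append_assoc] using hs'.symm⟩
          have hu : ¬ (['%', '%', 'Y'] <:+: u) := fun hi => h (hi.trans hsuf.isInfix)
          have hlen : u.length ≤ n := by
            have := congrArg List.length hs'
            simp at this
            simp at hn
            omega
          rcases htok : qtToken? c2 with _ | q
          · -- unknown directive letter: everything passes through
            have hL := tokNone_all htok
            rw [hs, Gskip hL hc2 (m + 1) u, replicate_shift, replicate_shift,
              scan_pct_repl, scan_none htok, scan_ne hc2, ih u hlen hu]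
          · -- a directive: the matching pass emits its token, all others pass it through
            have hB : scanQt ('%' :: w) = List.replicate m '%' ++ (q ++ scanQt u) := by
              rw [hs', scan_pct_repl, scan_tok htok]
            rcases tokSome_cases htok with ⟨rfl, rfl⟩ | ⟨rfl, rfl⟩ | ⟨rfl, rfl⟩ | ⟨rfl, rfl⟩ |
              ⟨rfl, rfl⟩ | ⟨rfl, rfl⟩ | ⟨rfl, rfl⟩ | ⟨rfl, rfl⟩
            · -- 'Y': a second leading '%' would put "%%Y" in the input, so m = 0
              have hm : m = 0 := by
                by_contra hm
                obtain ⟨k, rfl⟩ : ∃ k, m = k + 1 := ⟨m - 1, by omega⟩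
                exact h ⟨List.replicate k '%', u, by
                  rw [hs']; simp [List.replicate_succ', List.append_assoc]⟩
              subst hm
              simp only [List.replicate, List.nil_append] at hs' hB
              rw [hB, hs', CH_Y, ih u hlen hu]
            · rw [hB, hs', CH_y, ih u hlen hu]
            · rw [hB, hs', CH_m, ih u hlen hu]
            · rw [hB, hs', CH_d, ih u hlen hu]
            · rw [hB, hs', CH_B, ih u hlen hu]
            · rw [hB, hs', CH_b, ih u hlen hu]
            · rw [hB, hs', CH_A, ih u hlen hu]
            · rw [hB, hs', CH_a, ih u hlen hu]
      · have hw : ¬ (['%', '%', 'Y'] <:+: w) :=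
          fun hi => h (hi.trans (List.suffix_cons c w).isInfix)
        rw [G0 hc RL w, scan_ne hc, ih w (by simp at hn; omega) hw]

theorem chain_eq_scan (s : List Char) (h : ¬ (['%', '%', 'Y'] <:+: s)) :
    rchain RL s = scanQt s :=
  chain_aux s.length s le_rfl h

-- Port A computes the chain of rep2 passes
lemma portA_eq (m : String) : strftime_to_qt m = String.ofList (rchain RL m.toList) := by
  have tY : ("%Y" : String).toList = ['%', 'Y'] := by decide
  have ty : ("%y" : String).toList = ['%', 'y'] := by decide
  have tm : ("%m" : String).toList = ['%', 'm'] := by decide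
  have td : ("%d" : String).toList = ['%', 'd'] := by decide
  have tB : ("%B" : String).toList = ['%', 'B'] := by decide
  have tb : ("%b" : String).toList = ['%', 'b'] := by decide
  have tA : ("%A" : String).toList = ['%', 'A'] := by decide
  have ta : ("%a" : String).toList = ['%', 'a'] := by decide
  have q1 : ("yyyy" : String).toList = ['y', 'y', 'y', 'y'] := by decide
  have q2 : ("yy" : String).toList = ['y', 'y'] := by decide
  have q3 : ("MM" : String).toList = ['M', 'M'] := by decide
  have q4 : ("dd" : String).toList = ['d', 'd'] := by decide
  have q5 : ("MMMM" : String).toList = ['M', 'M', 'M', 'M'] := by decide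
  have q6 : ("MMM" : String).toList = ['M', 'M', 'M'] := by decide
  have q7 : ("dddd" : String).toList = ['d', 'd', 'd', 'd'] := by decide
  have q8 : ("ddd" : String).toList = ['d', 'd', 'd'] := by decide
  simp only [strftime_to_qt, List.foldl_cons, List.foldl_nil, PySem.Str.replace,
    String.toList_ofList, tY, ty, tm, td, tB, tb, tA, ta, q1, q2, q3, q4, q5, q6, q7, q8,
    chars_rep]
  simp [rchain, RL, List.foldl_cons, List.foldl_nil]


-- ===== tightness: A and B differ on EVERY input containing "%%Y" =====
lemma not_prefix_pctY {c : Char} (hc : c ≠ '%') (hcY : c ≠ 'Y') :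
    ∀ (j : Nat) (u : List Char), ¬ (['%', 'Y'] <+: List.replicate j '%' ++ c :: u) := by
  intro j u hp
  cases j with
  | zero =>
    rw [List.replicate_zero, List.nil_append] at hp
    exact hc (List.cons_prefix_cons.mp hp).1.symm
  | succ k =>
    rw [List.replicate_succ, List.cons_append] at hp
    have h2 := (List.cons_prefix_cons.mp hp).2
    cases k with
    | zero =>
      rw [List.replicate_zero, List.nil_append] at h2
      exact hcY (List.cons_prefix_cons.mp h2).1.symm
    | succ k2 =>
      rw [List.replicate_succ, List.cons_append] at h2
      exact absurd (List.cons_prefix_cons.mp h2).1 (by decide)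

lemma infix_drop_pct {c : Char} (hc : c ≠ '%') (hcY : c ≠ 'Y') :
    ∀ (j : Nat) (u : List Char),
      ['%', '%', 'Y'] <:+: (List.replicate j '%' ++ c :: u) → ['%', '%', 'Y'] <:+: u := by
  intro j
  induction j with
  | zero =>
    intro u h
    rw [List.replicate_zero, List.nil_append] at h
    rcases List.infix_cons_iff.mp h with hp | h2
    · exact absurd (List.cons_prefix_cons.mp hp).1 (Ne.symm hc)
    · exact h2
  | succ k ih =>
    intro u h
    rw [List.replicate_succ, List.cons_append] at h
    rcases List.infix_cons_iff.mp h with hp | h2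
    · exact absurd (List.cons_prefix_cons.mp hp).2 (not_prefix_pctY hc hcY k u)
    · exact ih u h2

lemma infix_drop_pctY {u : List Char} (h : ['%', '%', 'Y'] <:+: ('%' :: 'Y' :: u)) :
    ['%', '%', 'Y'] <:+: u := by
  rcases List.infix_cons_iff.mp h with hp | h2
  · exact absurd (List.cons_prefix_cons.mp (List.cons_prefix_cons.mp hp).2).1 (by decide)
  · rcases List.infix_cons_iff.mp h2 with hp | h3
    · exact absurd (List.cons_prefix_cons.mp hp).1 (by decide)
    · exact h3

lemma infix_cons_ne {c : Char} (hc : c ≠ '%') {w : List Char}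
    (h : ['%', '%', 'Y'] <:+: (c :: w)) : ['%', '%', 'Y'] <:+: w := by
  rcases List.infix_cons_iff.mp h with hp | h2
  · exact absurd (List.cons_prefix_cons.mp hp).1 (Ne.symm hc)
  · exact h2

lemma not_infix_repl (j : Nat) : ¬ (['%', '%', 'Y'] <:+: List.replicate j '%') := by
  intro h
  have hm : ('Y' : Char) ∈ List.replicate j '%' := h.subset (by simp)
  exact absurd (List.eq_of_mem_replicate hm) (by decide)

def TL : List (Char × List Char) :=
  [('y', ['y', 'y']), ('m', ['M', 'M']), ('d', ['d', 'd']),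
   ('B', ['M', 'M', 'M', 'M']), ('b', ['M', 'M', 'M']), ('A', ['d', 'd', 'd', 'd']),
   ('a', ['d', 'd', 'd'])]

lemma CHt_y : ∀ m X, rchain TL (List.replicate m '%' ++ '%' :: 'y' :: X)
    = List.replicate m '%' ++ (['y', 'y'] ++ rchain TL X) :=
  Gmatch TL []
    [('m', ['M', 'M']), ('d', ['d', 'd']), ('B', ['M', 'M', 'M', 'M']),
     ('b', ['M', 'M', 'M']), ('A', ['d', 'd', 'd', 'd']), ('a', ['d', 'd', 'd'])]
    'y' 'y' ['y', 'y'] ['y'] rfl rfl (by simp) (by simp) (by simp) (by simp) (by simp)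

-- at "%…%%Y", A's %Y-pass leaves "%yyyy" and its %y-pass consumes the extra '%'
lemma deepY_chain (m : Nat) (u : List Char) :
    rchain RL (List.replicate (m + 2) '%' ++ 'Y' :: u)
      = List.replicate m '%' ++
          ('y' :: 'y' :: 'y' :: 'y' :: 'y' :: rchain TL (rep2 'Y' ['y', 'y', 'y', 'y'] u)) := by
  have h0 : rchain RL (List.replicate (m + 2) '%' ++ 'Y' :: u)
      = rchain TL (rep2 'Y' ['y', 'y', 'y', 'y'] (List.replicate (m + 2) '%' ++ 'Y' :: u)) := rfl
  rw [h0, replicate_shift, Lmj (by decide)]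
  have h1 : List.replicate (m + 1) '%' ++
      (['y', 'y', 'y', 'y'] ++ rep2 'Y' ['y', 'y', 'y', 'y'] u)
      = List.replicate m '%' ++ '%' :: 'y' ::
          (['y', 'y', 'y'] ++ rep2 'Y' ['y', 'y', 'y', 'y'] u) := by
    rw [← replicate_shift]; simp
  rw [h1, CHt_y, Gtok0 (by simp [TL]) (by simp)]
  simp

lemma deepY_scan (m : Nat) (u : List Char) :
    scanQt (List.replicate (m + 2) '%' ++ 'Y' :: u)
      = List.replicate m '%' ++
          ('%' :: ('y' :: 'y' :: 'y' :: 'y' :: scanQt u)) := by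
  have h1 : List.replicate (m + 2) '%' ++ 'Y' :: u
      = List.replicate m '%' ++ '%' :: ('%' :: 'Y' :: u) := by
    rw [show m + 2 = (m + 1) + 1 from rfl, replicate_shift, replicate_shift]
  rw [h1, scan_pct_repl, scan_none (by rfl), scan_tok (by rfl)]
  rfl

theorem chain_ne_aux : ∀ (n : Nat) (s : List Char), s.length ≤ n →
    (['%', '%', 'Y'] <:+: s) → rchain RL s ≠ scanQt s := by
  intro n
  induction n with
  | zero =>
    intro s hn h
    have : s = [] := List.eq_nil_of_length_eq_zero (Nat.le_zero.mp hn)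
    subst this
    exact absurd (List.eq_nil_of_sublist_nil h.sublist) (by decide)
  | succ n ih =>
    intro s hn h
    rcases s with _ | ⟨c, w⟩
    · exact absurd (List.eq_nil_of_sublist_nil h.sublist) (by decide)
    · by_cases hc : c = '%'
      · subst hc
        obtain ⟨j, r, hs, hr, hj⟩ := lead_decomp ('%' :: w)
        have hj1 : 1 ≤ j := hj (by simp)
        obtain ⟨m, rfl⟩ : ∃ m, j = m + 1 := ⟨j - 1, by omega⟩
        rcases r with _ | ⟨c2, u⟩
        · rw [List.append_nil] at hs
          rw [hs] at h
          exact absurd h (not_infix_repl (m + 1))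
        · have hc2 : c2 ≠ '%' := by simpa using hr
          have hs' : '%' :: w = List.replicate m '%' ++ '%' :: c2 :: u := by
            rw [hs, replicate_shift]
          have hlen : u.length ≤ n := by
            have := congrArg List.length hs'
            simp at this
            simp at hn
            omega
          rcases htok : qtToken? c2 with _ | q
          · have hcY : c2 ≠ 'Y' := by rintro rfl; simp [qtToken?] at htok
            have hu : ['%', '%', 'Y'] <:+: u := by
              rw [hs] at h; exact infix_drop_pct hc2 hcY (m + 1) u h
            have hL := tokNone_all htok
            have hA : rchain RL ('%' :: w)
                = List.replicate m '%' ++ '%' :: c2 :: rchain RL u := by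
              rw [hs, Gskip hL hc2 (m + 1) u, replicate_shift]
            have hB : scanQt ('%' :: w)
                = List.replicate m '%' ++ '%' :: c2 :: scanQt u := by
              rw [hs', scan_pct_repl, scan_none htok, scan_ne hc2]
            intro hEq
            rw [hA, hB] at hEq
            have h1 := List.append_cancel_left hEq
            simp only [List.cons.injEq, true_and] at h1
            exact ih u hlen hu h1
          · have hB : scanQt ('%' :: w) = List.replicate m '%' ++ (q ++ scanQt u) := by
              rw [hs', scan_pct_repl, scan_tok htok]
            rcases tokSome_cases htok with ⟨rfl, rfl⟩ | ⟨rfl, rfl⟩ | ⟨rfl, rfl⟩ | ⟨rfl, rfl⟩ |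
              ⟨rfl, rfl⟩ | ⟨rfl, rfl⟩ | ⟨rfl, rfl⟩ | ⟨rfl, rfl⟩
            · -- 'Y'
              rcases m with _ | k
              · -- a single leading '%': "%Y" converts on both sides, recurse
                have hu : ['%', '%', 'Y'] <:+: u := by
                  simp only [List.replicate, List.nil_append] at hs'
                  rw [hs'] at h; exact infix_drop_pctY h
                simp only [List.replicate, List.nil_append] at hs' hB
                intro hEq
                rw [hB, hs', CH_Y] at hEq
                exact ih u hlen hu (List.append_cancel_left hEq)
              · -- at least two leading '%': A and B provably differ right here
                have hs2 : '%' :: w = List.replicate (k + 2) '%' ++ 'Y' :: u := by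
                  rw [hs]
                intro hEq
                rw [hs2, deepY_chain, deepY_scan] at hEq
                have h1 := List.append_cancel_left hEq
                simp at h1
            · have hu : ['%', '%', 'Y'] <:+: u := by
                rw [hs] at h; exact infix_drop_pct (by decide) (by decide) (m + 1) u h
              intro hEq
              rw [hB, hs', CH_y] at hEq
              exact ih u hlen hu (List.append_cancel_left (List.append_cancel_left hEq))
            · have hu : ['%', '%', 'Y'] <:+: u := by
                rw [hs] at h; exact infix_drop_pct (by decide) (by decide) (m + 1) u h
              intro hEq
              rw [hB, hs', CH_m] at hEq
              exact ih u hlen hu (List.append_cancel_left (List.append_cancel_left hEq))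
            · have hu : ['%', '%', 'Y'] <:+: u := by
                rw [hs] at h; exact infix_drop_pct (by decide) (by decide) (m + 1) u h
              intro hEq
              rw [hB, hs', CH_d] at hEq
              exact ih u hlen hu (List.append_cancel_left (List.append_cancel_left hEq))
            · have hu : ['%', '%', 'Y'] <:+: u := by
                rw [hs] at h; exact infix_drop_pct (by decide) (by decide) (m + 1) u h
              intro hEq
              rw [hB, hs', CH_B] at hEq
              exact ih u hlen hu (List.append_cancel_left (List.append_cancel_left hEq))
            · have hu : ['%', '%', 'Y'] <:+: u := by
                rw [hs] at h; exact infix_drop_pct (by decide) (by decide) (m + 1) u h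
              intro hEq
              rw [hB, hs', CH_b] at hEq
              exact ih u hlen hu (List.append_cancel_left (List.append_cancel_left hEq))
            · have hu : ['%', '%', 'Y'] <:+: u := by
                rw [hs] at h; exact infix_drop_pct (by decide) (by decide) (m + 1) u h
              intro hEq
              rw [hB, hs', CH_A] at hEq
              exact ih u hlen hu (List.append_cancel_left (List.append_cancel_left hEq))
            · have hu : ['%', '%', 'Y'] <:+: u := by
                rw [hs] at h; exact infix_drop_pct (by decide) (by decide) (m + 1) u h
              intro hEq
              rw [hB, hs', CH_a] at hEq
              exact ih u hlen hu (List.append_cancel_left (List.append_cancel_left hEq))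
      · have hw : ['%', '%', 'Y'] <:+: w := infix_cons_ne hc h
        intro hEq
        rw [G0 hc RL w, scan_ne hc] at hEq
        simp only [List.cons.injEq, true_and] at hEq
        exact ih w (by simp at hn; omega) hw hEq

-- ===== VERDICT (by name: the statement is the Claim_ definition above) =====
theorem strftime_to_qt_spec : Claim_unchanged_strftime_to_qt := by
  intro m _ hD
  have hinf : ¬ (['%', '%', 'Y'] <:+: m.toList) := by
    intro hi
    apply hD
    unfold D_strftime_to_qt
    rw [PySem.Str.isIn_iff_infix]
    have : ("%%Y" : String).toList = ['%', '%', 'Y'] := by decide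
    rw [this]
    exact hi
  rw [portA_eq, chain_eq_scan m.toList hinf]
  rfl

theorem strftime_to_qt_changed : Claim_changed_strftime_to_qt := by
  unfold Claim_changed_strftime_to_qt; decide

theorem strftime_to_qt_tight : Claim_exact_strftime_to_qt := by
  intro m _ hD hEq
  have hinf : ['%', '%', 'Y'] <:+: m.toList := by
    have h1 := (PySem.Str.isIn_iff_infix "%%Y" m).mp hD
    have h2 : ("%%Y" : String).toList = ['%', '%', 'Y'] := by decide
    rwa [h2] at h1
  apply chain_ne_aux m.toList.length m.toList le_rfl hinf
  rw [portA_eq] at hEq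
  have h3 := congrArg String.toList hEq
  simpa [strftime_to_qt_alt, String.toList_ofList] using h3
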